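-- pv_equiv track=rewrite | github.com/oijmark7/python_ | 문제300/4차/4차 2급 5_initial_code.py | solution
-- ===== SOURCE A (Python) =====
-- def solution(calorie):
--     #min_cal=0 오답
--     #min_cal = calorie[0] 우리가푼 문제
--     min_cal=1000#정답: 모든 열량보다 큰수의 임의값삾
--     answer = 0
--     for cal in calorie:#모든 열량을 하나씩 cal에 대입
--         if cal > min_cal:#현재 열량이 최소열량보다 크면
--             answer += cal - min_cal#현재열량-최소열량
--         min_cal = min(min_cal, cal)#최소열량과 현재 열량중 작은값을 최소열량량
--     return answer
-- ===== SOURCE B (Python) =====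
-- def solution(calorie):
--     # Identity: max(0, c - prior_min) = c - min_including_c (minima capped at 1000),
--     # so the answer is sum(calorie) minus the sum of inclusive prefix minima.
--     mins = []
--     m = 1000
--     for c in calorie:
--         m = min(m, c)
--         mins.append(m)
--     return sum(calorie) - sum(mins)
-- ===== Notes on version B (the rewrite author's own statement) =====
-- stated objective: alternative
-- what changed: Replaces A's accumulation of conditional excesses (c - running_min when c exceeds the prior minimum) with the algebraic identity max(0, c - prior_min) = c - inclusive_min: B builds the list of inclusive prefix minima (capped at 1000) and returns sum(calorie) - sum(mins), with no comparison or excess term anywhere.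
import Mathlib
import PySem

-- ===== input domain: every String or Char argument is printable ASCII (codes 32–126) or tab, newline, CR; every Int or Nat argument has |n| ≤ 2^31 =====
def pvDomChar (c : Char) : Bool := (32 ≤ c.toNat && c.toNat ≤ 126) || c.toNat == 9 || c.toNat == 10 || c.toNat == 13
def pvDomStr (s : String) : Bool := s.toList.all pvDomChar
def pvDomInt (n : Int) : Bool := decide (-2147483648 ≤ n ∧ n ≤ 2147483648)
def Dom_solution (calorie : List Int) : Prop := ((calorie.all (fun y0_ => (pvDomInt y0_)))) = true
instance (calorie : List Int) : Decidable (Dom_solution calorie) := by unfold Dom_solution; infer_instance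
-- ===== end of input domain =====

-- B replaces A's accumulation of conditional excesses over the prior running minimum with the identity
-- max(0, c - prior_min) = c - inclusive_min: it builds the inclusive-prefix-minima list and returns sum(calorie) - sum(mins).

-- ===== PORT A =====
-- loop over calorie carrying the state (min_cal, answer); branch before the min update, as in A
def solution (calorie : List Int) : Int :=
  (calorie.foldl
    (fun (st : Int × Int) cal =>
      (min st.1 cal, if cal > st.1 then st.2 + (cal - st.1) else st.2))
    (1000, 0)).2

-- ===== PORT B =====
-- pass 1: the loop appending min(m, c) to mins, carrying (m, mins); pass 2: sum(calorie) - sum(mins), sums as foldl (+) 0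
def solution_alt (calorie : List Int) : Int :=
  let mins := (calorie.foldl
    (fun (st : Int × List Int) c => (min st.1 c, st.2 ++ [min st.1 c]))
    (1000, [])).2
  calorie.foldl (· + ·) 0 - mins.foldl (· + ·) 0

-- ===== PRECONDITION & SPEC =====
def Spec_solution (calorie : List Int) (out : Int) : Prop := out = solution_alt calorie
instance (calorie : List Int) (out : Int) : Decidable (Spec_solution calorie out) := by unfold Spec_solution; infer_instance

-- ===== CLAIM (what is proved, stated in full; the proofs are below) =====
def Claim_equal_solution : Prop := ∀ (calorie : List Int), Dom_solution calorie → Spec_solution calorie (solution calorie)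

-- ===== LEMMAS AND PROOFS =====
theorem foldl_add_shift (t : List Int) (b : Int) :
    t.foldl (· + ·) b = b + t.foldl (· + ·) 0 := by
  induction t generalizing b with
  | nil => simp
  | cons c t ih => simp only [List.foldl_cons]; rw [ih (b + c), ih (0 + c)]; omega

-- joint invariant of A's loop and B's mins-building loop:
-- answer-so-far + sum of the mins still to be produced = starting values + sum of the remaining list
theorem solution_key (l : List Int) : ∀ (m a : Int) (acc : List Int),
    (l.foldl
      (fun (st : Int × Int) cal =>
        (min st.1 cal, if cal > st.1 then st.2 + (cal - st.1) else st.2))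
      (m, a)).2
    + ((l.foldl (fun (st : Int × List Int) c => (min st.1 c, st.2 ++ [min st.1 c]))
        (m, acc)).2).foldl (· + ·) 0
    = a + acc.foldl (· + ·) 0 + l.foldl (· + ·) 0 := by
  induction l with
  | nil => intro m a acc; simp
  | cons c t ih =>
    intro m a acc
    simp only [List.foldl_cons]
    rw [ih (min m c), foldl_add_shift t (0 + c)]
    have hacc : (acc ++ [min m c]).foldl (· + ·) 0 = acc.foldl (· + ·) 0 + min m c := by
      rw [List.foldl_append]; simp
    rw [hacc, min_def]
    split_ifs <;> omega

-- ===== VERDICT (by name: the statement is the Claim_ definition above) =====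
theorem solution_spec : Claim_equal_solution := by
  intro calorie _
  unfold Spec_solution solution solution_alt
  have h := solution_key calorie 1000 0 []
  simp only [List.foldl_nil] at h
  dsimp only
  omega
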